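-- pv_equiv track=rewrite | github.com/malik31200/holbertonschool-Markdown2HTML | markdown2html.py | convert_heading
-- ===== SOURCE A (Python) =====
-- def convert_heading(line):
--     """Convert markdown heading to HTML"""
--     if line.startswith("#"):
--         count = 0
--         while count < len(line) and line[count] == "#":
--             count += 1
--
--         if count <= 6 and count < len(line) and line[count] == " ":
--             content = line[count + 1:].strip()
--             return f"<h{count}>{content}</h{count}>"
--     return None
-- ===== SOURCE B (Python) =====
-- def convert_heading(line):
--     """Convert markdown heading to HTML"""
--     head, sep, rest = line.partition(" ")
--     if sep and head in ("#", "##", "###", "####", "#####", "######"):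
--         n = len(head)
--         return f"<h{n}>{rest.strip()}</h{n}>"
--     return None
-- ===== Notes on version B (the rewrite author's own statement) =====
-- stated objective: idiomatic
-- what changed: Instead of counting leading '#' with an index while-loop and re-checking bounds and the space character, B splits the line once at the first space with str.partition and validates the prefix by membership in the fixed table of the six legal hash strings.
import Mathlib
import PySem

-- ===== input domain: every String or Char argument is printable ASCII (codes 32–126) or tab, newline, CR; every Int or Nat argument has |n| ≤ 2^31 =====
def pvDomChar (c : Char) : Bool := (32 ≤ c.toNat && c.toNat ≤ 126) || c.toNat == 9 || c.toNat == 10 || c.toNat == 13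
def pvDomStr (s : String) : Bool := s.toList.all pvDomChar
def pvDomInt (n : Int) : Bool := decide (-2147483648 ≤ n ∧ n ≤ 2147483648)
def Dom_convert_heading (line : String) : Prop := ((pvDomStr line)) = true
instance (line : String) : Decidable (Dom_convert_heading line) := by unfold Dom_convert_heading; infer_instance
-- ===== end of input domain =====

-- B replaces A's index while-loop by a single partition at the first space plus a
-- membership test of the prefix against the six legal hash strings; return values only.

-- ===== PORT A =====
-- the while loop 'while count < len(line) and line[count] == "#": count += 1',
-- as structural recursion over the characters still ahead of the index
def chHashLoopA : List Char → Nat → Nat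
  | [], count => count
  | c :: rest, count => if c == '#' then chHashLoopA rest (count + 1) else count

def convert_heading (line : String) : Option String :=
  let cs := line.toList
  if PySem.Chars.startswith cs ['#'] then
    let count := chHashLoopA cs 0
    if count ≤ 6 ∧ count < cs.length ∧ PySem.Chars.pyGet? cs (count : Int) = some ' ' then
      let content := PySem.Chars.strip (PySem.Chars.slice cs (some ((count : Int) + 1)) none)
      some (String.ofList ("<h".toList ++ PySem.Int.toChars count ++ ">".toList
            ++ content ++ "</h".toList ++ PySem.Int.toChars count ++ ">".toList))
    else none
  else none

-- ===== PORT B =====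
-- line.partition(" "): head = chars before the first ' ', rest = chars after it;
-- sep nonempty iff a space occurs, i.e. the dropWhile result is nonempty
def chHashTable : List (List Char) :=
  [['#'], ['#','#'], ['#','#','#'], ['#','#','#','#'],
   ['#','#','#','#','#'], ['#','#','#','#','#','#']]

def convert_heading_alt (line : String) : Option String :=
  let cs := line.toList
  let head := cs.takeWhile (· != ' ')       -- chars before the first space
  let sepRest := cs.dropWhile (· != ' ')    -- the first space (if any) and what follows
  if sepRest.isEmpty then none              -- 'if sep' false: no space in line
  else if head ∈ chHashTable then
    let n := head.length
    some (String.ofList ("<h".toList ++ PySem.Int.toChars n ++ ">".toList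
          ++ PySem.Chars.strip sepRest.tail ++ "</h".toList ++ PySem.Int.toChars n ++ ">".toList))
  else none

-- ===== PRECONDITION & SPEC =====
def Spec_convert_heading (line : String) (out : Option String) : Prop := out = convert_heading_alt line
instance (line : String) (out : Option String) : Decidable (Spec_convert_heading line out) := by unfold Spec_convert_heading; infer_instance

-- ===== CLAIM (what is proved, stated in full; the proofs are below) =====
def Claim_equal_convert_heading : Prop := ∀ (line : String), Dom_convert_heading line → Spec_convert_heading line (convert_heading line)

-- ===== LEMMAS AND PROOFS =====

-- let-free bodies of the two ports, for proving (the ports zeta-reduce to them)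
def chABody (cs : List Char) : Option String :=
  if PySem.Chars.startswith cs ['#'] then
    if chHashLoopA cs 0 ≤ 6 ∧ chHashLoopA cs 0 < cs.length ∧
        PySem.Chars.pyGet? cs (chHashLoopA cs 0 : Int) = some ' ' then
      some (String.ofList ("<h".toList ++ PySem.Int.toChars (chHashLoopA cs 0) ++ ">".toList
            ++ PySem.Chars.strip (PySem.Chars.slice cs (some ((chHashLoopA cs 0 : Int) + 1)) none)
            ++ "</h".toList ++ PySem.Int.toChars (chHashLoopA cs 0) ++ ">".toList))
    else none
  else none

def chBBody (cs : List Char) : Option String :=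
  if (cs.dropWhile (· != ' ')).isEmpty then none
  else if cs.takeWhile (· != ' ') ∈ chHashTable then
    some (String.ofList ("<h".toList ++ PySem.Int.toChars (cs.takeWhile (· != ' ')).length ++ ">".toList
          ++ PySem.Chars.strip (cs.dropWhile (· != ' ')).tail ++ "</h".toList
          ++ PySem.Int.toChars (cs.takeWhile (· != ' ')).length ++ ">".toList))
  else none

lemma convert_heading_eq_body (line : String) : convert_heading line = chABody line.toList := by
  unfold convert_heading chABody; rfl
lemma convert_heading_alt_eq_body (line : String) : convert_heading_alt line = chBBody line.toList := by
  unfold convert_heading_alt chBBody; rfl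

lemma chHashLoop_append (t d : List Char) (n : Nat) (htp : ∀ c ∈ t, c = '#')
    (hdp : ∀ c, d.head? = some c → c ≠ '#') :
    chHashLoopA (t ++ d) n = n + t.length := by
  induction t generalizing n with
  | nil =>
    cases d with
    | nil => simp [chHashLoopA]
    | cons y ys =>
      have : y ≠ '#' := hdp y (by simp)
      simp [chHashLoopA, this]
  | cons c t' ih =>
    have hc : c = '#' := htp c (by simp)
    simp only [List.cons_append, chHashLoopA, hc, beq_self_eq_true, if_true]
    rw [ih (n + 1) (fun x hx => htp x (by simp [hx]))]
    simp; omega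

-- membership in the fixed table is exactly 'all hashes, length between 1 and 6'
lemma mem_hashTable_iff (t : List Char) (htp : ∀ c ∈ t, c = '#') :
    t ∈ chHashTable ↔ 1 ≤ t.length ∧ t.length ≤ 6 := by
  have ht : t = List.replicate t.length '#' := by
    apply List.eq_replicate_of_mem; intro c hc; exact htp c hc
  rw [ht]
  generalize t.length = n
  simp only [List.length_replicate]
  constructor
  · intro h
    simp only [chHashTable, List.mem_cons, List.not_mem_nil, or_false] at h
    rcases h with h | h | h | h | h | h <;>
      (have := congrArg List.length h; simp at this; omega)
  · rintro ⟨h1, h6⟩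
    have h6' : n < 7 := by omega
    interval_cases n <;> decide

lemma takeWhile_hash_append (t d : List Char) (htp : ∀ c ∈ t, c = '#') :
    (t ++ d).takeWhile (· != ' ') = t ++ d.takeWhile (· != ' ') := by
  induction t with
  | nil => simp
  | cons c t' ih =>
    have hc : c = '#' := htp c (by simp)
    simp only [List.cons_append, List.takeWhile_cons, hc]
    rw [ih (fun x hx => htp x (by simp [hx]))]
    rfl

lemma dropWhile_hash_append (t d : List Char) (htp : ∀ c ∈ t, c = '#') :
    (t ++ d).dropWhile (· != ' ') = d.dropWhile (· != ' ') := by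
  induction t with
  | nil => simp
  | cons c t' ih =>
    have hc : c = '#' := htp c (by simp)
    simp only [List.cons_append, List.dropWhile_cons, hc]
    exact ih (fun x hx => htp x (by simp [hx]))

lemma hashTable_all (m : List Char) (hm : m ∈ chHashTable) : ∀ c ∈ m, c = '#' := by
  intro c hc
  fin_cases hm <;> simp_all

lemma core_body_eq (t d : List Char) (htp : ∀ c ∈ t, c = '#')
    (hdp : ∀ c, d.head? = some c → c ≠ '#') :
    chABody (t ++ d) = chBBody (t ++ d) := by
  unfold chABody chBBody
  rw [chHashLoop_append t d 0 htp hdp, takeWhile_hash_append t d htp,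
      dropWhile_hash_append t d htp]
  simp only [Nat.zero_add]
  cases d with
  | nil =>
    simp only [List.dropWhile_nil, List.isEmpty_nil, if_true]
    split
    · rw [if_neg]; rintro ⟨-, h2, -⟩; simp at h2
    · rfl
  | cons y ys =>
    have hy : y ≠ '#' := hdp y (by simp)
    have hget : PySem.Chars.pyGet? (t ++ y :: ys) (t.length : Int) = some y := by
      simp only [PySem.Chars.pyGet?_eq_listPyGet?]
      exact PySem.List.pyGet?_append_length ..
    by_cases hysp : y = ' '
    · -- the char after the hashes is the space: both succeed iff 1 ≤ |t| ≤ 6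
      subst hysp
      have hdw : (' ' :: ys).dropWhile (· != ' ') = ' ' :: ys := by simp
      have htw : (' ' :: ys).takeWhile (· != ' ') = [] := by simp
      rw [hdw, htw, List.append_nil]
      cases t with
      | nil =>
        -- no leading '#': A's startswith fails, B's membership fails
        have hsw : PySem.Chars.startswith (([] : List Char) ++ ' ' :: ys) ['#'] = false := by
          rw [Bool.eq_false_iff]
          intro h
          rw [PySem.Chars.startswith_iff] at h
          obtain ⟨s, hs⟩ := h
          simp at hs
        rw [hsw]
        simp only [Bool.false_eq_true, if_false, List.isEmpty_cons, Bool.false_eq_true]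
        rw [if_neg]
        rw [mem_hashTable_iff [] (by simp)]
        simp
      | cons c t' =>
        have hc : c = '#' := htp c (by simp)
        have hsw : PySem.Chars.startswith ((c :: t') ++ ' ' :: ys) ['#'] = true := by
          rw [PySem.Chars.startswith_iff, hc]
          exact ⟨t' ++ ' ' :: ys, by simp⟩
        rw [hsw, if_pos rfl]
        have hltlen : (c :: t').length < ((c :: t') ++ ' ' :: ys).length := by simp
        have hslice : PySem.Chars.slice ((c :: t') ++ ' ' :: ys) (some (((c :: t').length : Int) + 1)) none = ys := by
          simp only [PySem.Chars.slice_eq_listSlice]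
          have h1 : (((c :: t').length : Int) + 1) = (((c :: t').length + 1 : Nat) : Int) := by push_cast; ring
          rw [h1, PySem.List.slice_from_natCast]
          have h3 : (c :: t') ++ ' ' :: ys = ((c :: t') ++ [' ']) ++ ys := by simp
          have h4 : (c :: t').length + 1 = ((c :: t') ++ [' ']).length := by simp
          rw [h3, h4, List.drop_left]
        have hmem := mem_hashTable_iff (c :: t') (fun x hx => htp x hx)
        simp only [List.isEmpty_cons, Bool.false_eq_true, if_false, List.tail_cons]
        by_cases h6 : (c :: t').length ≤ 6
        · rw [if_pos ⟨h6, hltlen, hget⟩, if_pos (hmem.mpr ⟨by simp, h6⟩), hslice]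
        · rw [if_neg (fun h => h6 h.1), if_neg (fun h => h6 ((hmem.mp h).2))]
    · -- first non-'#' char is neither space nor '#': A's space check and B's membership both fail
      have hAnone :
          (if PySem.Chars.startswith (t ++ y :: ys) ['#'] = true then
            if t.length ≤ 6 ∧ t.length < (t ++ y :: ys).length ∧
                PySem.Chars.pyGet? (t ++ y :: ys) (t.length : Int) = some ' ' then
              some (String.ofList ("<h".toList ++ PySem.Int.toChars t.length ++ ">".toList
                ++ PySem.Chars.strip (PySem.Chars.slice (t ++ y :: ys) (some ((t.length : Int) + 1)) none)
                ++ "</h".toList ++ PySem.Int.toChars t.length ++ ">".toList))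
            else none
          else none) = none := by
        split
        · rw [if_neg]
          rintro ⟨-, -, h3⟩
          rw [hget] at h3
          injection h3 with h3
          exact hysp h3
        · rfl
      rw [hAnone]
      have hnm : t ++ (y :: ys).takeWhile (· != ' ') ∉ chHashTable := by
        intro hm
        have hytw : (y :: ys).takeWhile (· != ' ') = y :: ys.takeWhile (· != ' ') := by
          simp [hysp]
        rw [hytw] at hm
        exact hy (hashTable_all _ hm y (by simp))
      by_cases hemp : ((y :: ys).dropWhile (· != ' ')).isEmpty = true
      · rw [if_pos hemp]
      · rw [if_neg hemp, if_neg hnm]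

-- ===== VERDICT (by name: the statement is the Claim_ definition above) =====
theorem convert_heading_spec : Claim_equal_convert_heading := by
  intro line _
  unfold Spec_convert_heading
  rw [convert_heading_eq_body, convert_heading_alt_eq_body]
  have hsplit : line.toList = line.toList.takeWhile (· == '#') ++ line.toList.dropWhile (· == '#') :=
    (List.takeWhile_append_dropWhile).symm
  rw [hsplit]
  apply core_body_eq
  · intro c hc
    have := List.mem_takeWhile_imp hc
    simpa using this
  · intro c hc
    have := List.head?_dropWhile_not (p := (· == '#')) (l := line.toList)
    intro he
    subst he
    rw [hc] at this
    simp at this
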